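-- pv_equiv track=rewrite | github.com/tycyd/codeforces | bit operation/1395C Boboniu and Bit Operations.py | boboniu_and_bit_operations
-- ===== SOURCE A (Python) =====
-- def boboniu_and_bit_operations(n, m, a_a, b_a):
--
--     for k in range(513):
--         cnt = 0
--         for a in a_a:
--             for b in b_a:
--                 if ((a & b) | k) == k:
--                     cnt += 1
--                     break
--         if cnt == n:
--             return k
--
--     return -1
-- ===== SOURCE B (Python) =====
-- def boboniu_and_bit_operations(n, m, a_a, b_a):
--     # Sum-over-subsets DP: for each a, build the 1024-entry feasibility table of its
--     # achievable (a & b) values, close it upward over supersets in 10 staged passes,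
--     # accumulate per-k counts; the answer is then a single table scan.
--     cnt = [0] * 1024
--     for a in a_a:
--         vs = {a & b for b in b_a}
--         ok = [k in vs for k in range(1024)]
--         for bit in range(10):
--             step = 1 << bit
--             ok = [ok[k] or (k & step != 0 and ok[k ^ step]) for k in range(1024)]
--         cnt = [cnt[k] + 1 if ok[k] else cnt[k] for k in range(1024)]
--     for k in range(513):
--         if cnt[k] == n:
--             return k
--     return -1
-- ===== Notes on version B (the rewrite author's own statement) =====
-- stated objective: faster
-- what changed: B replaces the per-candidate rescans of A (for each of 513 k's, re-test every (a,b) pair) by a sum-over-subsets DP: per a it marks achievable a&b values in a 1024-entry table, closes it over supersets in 10 passes, accumulates per-k counts once, and answers with a single table scan.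
import Mathlib
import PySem

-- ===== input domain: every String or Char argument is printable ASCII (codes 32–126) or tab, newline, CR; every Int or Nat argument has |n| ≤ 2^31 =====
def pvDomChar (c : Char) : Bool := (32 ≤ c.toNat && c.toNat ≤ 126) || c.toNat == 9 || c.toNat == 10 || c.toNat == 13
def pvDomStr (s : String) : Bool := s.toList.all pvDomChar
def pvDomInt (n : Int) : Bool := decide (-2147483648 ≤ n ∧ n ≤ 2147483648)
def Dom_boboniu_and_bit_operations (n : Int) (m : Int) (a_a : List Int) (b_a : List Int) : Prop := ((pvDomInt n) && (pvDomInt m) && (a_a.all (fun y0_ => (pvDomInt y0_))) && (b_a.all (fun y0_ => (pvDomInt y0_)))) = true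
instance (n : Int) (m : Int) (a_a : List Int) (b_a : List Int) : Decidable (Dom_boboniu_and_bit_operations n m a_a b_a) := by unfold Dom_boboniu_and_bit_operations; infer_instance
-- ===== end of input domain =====

-- B replaces A's 513 rescans of all (a,b) pairs by a per-a sum-over-subsets DP on a
-- 1024-entry table plus one accumulated count per candidate k (faster by a constant factor).

-- ===== PORT A =====
def pvA_cnt (k : Int) (a_a : List Int) (b_a : List Int) : Int :=
  a_a.foldl (fun cnt a =>
    if b_a.any (fun b => ((Int.land a b).lor k == k)) then cnt + 1 else cnt) 0

def pvA_loop (n : Int) (a_a : List Int) (b_a : List Int) : List Int → Int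
  | [] => -1
  | k :: ks => if pvA_cnt k a_a b_a == n then k else pvA_loop n a_a b_a ks

def boboniu_and_bit_operations (n : Int) (m : Int) (a_a : List Int) (b_a : List Int) : Int :=
  pvA_loop n a_a b_a (PySem.List.pyRange 0 513 1)

-- ===== PORT B =====
-- Source B's fixed-length-1024 Python lists are ported as Array; each list comprehension
-- `[... for k in range(1024)]` becomes the corresponding Array.ofFn over Fin 1024, and
-- the set comprehension `{a & b for b in b_a}` becomes PySem.Set.ofList of the mapped list.

-- `vs = {a & b for b in b_a}`
def pvVs (a : Int) (b_a : List Int) : PySem.Set Int :=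
  PySem.Set.ofList (b_a.map (fun b => Int.land a b))

-- `ok = [k in vs for k in range(1024)]`
def pvSeed (a : Int) (b_a : List Int) : Array Bool :=
  Array.ofFn (fun k : Fin 1024 => PySem.Set.contains (pvVs a b_a) ((k.val : Nat) : Int))

-- `ok = [ok[k] or (k & step != 0 and ok[k ^ step]) for k in range(1024)]`
def pvPass (step : Nat) (t : Array Bool) : Array Bool :=
  Array.ofFn (fun k : Fin 1024 =>
    t[k.val]! || (decide (k.val &&& step ≠ 0) && t[k.val ^^^ step]!))

-- `for bit in range(10): step = 1 << bit; ...`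
def pvSos (t : Array Bool) : Array Bool :=
  (List.range 10).foldl (fun t bit => pvPass (1 <<< bit) t) t

def pvOk (a : Int) (b_a : List Int) : Array Bool := pvSos (pvSeed a b_a)

-- the outer `for a in a_a:` loop with `cnt = [cnt[k] + 1 if ok[k] else cnt[k] ...]`
def pvCnt (a_a : List Int) (b_a : List Int) : Array Int :=
  a_a.foldl (fun cnt a =>
    let ok := pvOk a b_a
    Array.ofFn (fun k : Fin 1024 => if ok[k.val]! then cnt[k.val]! + 1 else cnt[k.val]!))
    (Array.replicate 1024 0)

-- `for k in range(513): if cnt[k] == n: return k` / `return -1`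
def pvB_scan (n : Int) (cnt : Array Int) : List Int → Int
  | [] => -1
  | k :: ks => if cnt[k.toNat]! == n then k else pvB_scan n cnt ks

def boboniu_and_bit_operations_alt (n : Int) (m : Int) (a_a : List Int) (b_a : List Int) : Int :=
  pvB_scan n (pvCnt a_a b_a) (PySem.List.pyRange 0 513 1)

-- ===== PRECONDITION & SPEC =====
def Spec_boboniu_and_bit_operations (n : Int) (m : Int) (a_a : List Int) (b_a : List Int) (out : Int) : Prop := out = boboniu_and_bit_operations_alt n m a_a b_a
instance (n : Int) (m : Int) (a_a : List Int) (b_a : List Int) (out : Int) : Decidable (Spec_boboniu_and_bit_operations n m a_a b_a out) := by unfold Spec_boboniu_and_bit_operations; infer_instance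

-- ===== CLAIM (what is proved, stated in full; the proofs are below) =====
def Claim_equal_boboniu_and_bit_operations : Prop := ∀ (n : Int) (m : Int) (a_a : List Int) (b_a : List Int), Dom_boboniu_and_bit_operations n m a_a b_a → Spec_boboniu_and_bit_operations n m a_a b_a (boboniu_and_bit_operations n m a_a b_a)

-- ===== LEMMAS AND PROOFS =====

-- Reading the ported tables.
lemma pv_ofFn_get {α : Type} [Inhabited α] (f : Fin 1024 → α) (j : Nat) (hj : j < 1024) :
    (Array.ofFn f)[j]! = f ⟨j, hj⟩ := by
  rw [getElem!_pos _ _ (by simp [hj])]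
  simp

lemma pv_repl_get (j : Nat) (hj : j < 1024) : (Array.replicate 1024 (0 : Int))[j]! = 0 := by
  rw [getElem!_pos _ _ (by simp [hj])]
  simp

lemma pv_pass_get (step : Nat) (t : Array Bool) (j : Nat) (hj : j < 1024) :
    (pvPass step t)[j]! = (t[j]! || (decide (j &&& step ≠ 0) && t[j ^^^ step]!)) := by
  unfold pvPass
  rw [pv_ofFn_get _ j hj]

-- Bit facts.
lemma pv_xor_or (k b : Nat) (h : k &&& 2 ^ b ≠ 0) : (k ^^^ 2 ^ b) ||| k = k := by
  have hb : k.testBit b = true := by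
    revert h
    rw [Nat.and_two_pow]
    cases k.testBit b <;> simp
  apply Nat.eq_of_testBit_eq
  intro i
  by_cases hi : b = i
  · subst hi; simp [Nat.testBit_or, Nat.testBit_xor, hb]
  · simp [Nat.testBit_or, Nat.testBit_xor, hi]

lemma pv_sub_trans {v u k : Nat} (h1 : v ||| u = u) (h2 : u ||| k = k) : v ||| k = k := by
  calc v ||| k = v ||| (u ||| k) := by rw [h2]
    _ = (v ||| u) ||| k := by rw [Nat.or_assoc]
    _ = u ||| k := by rw [h1]
    _ = k := h2

lemma pv_mod_or (k m : Nat) : (k % 2 ^ m) ||| k = k := by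
  apply Nat.eq_of_testBit_eq
  intro i
  simp only [Nat.testBit_or, Nat.testBit_mod_two_pow]
  by_cases hi : i < m <;> simp [hi]

-- Soundness: every true entry of a processed table is covered by a true seed submask.
lemma pv_sosFold_sound (t0 : Array Bool) (l : List Nat) (hl : ∀ b ∈ l, b < 10)
    (t : Array Bool)
    (hs : ∀ j, j < 1024 → t[j]! = true → ∃ v, v < 1024 ∧ t0[v]! = true ∧ v ||| j = j) :
    ∀ j, j < 1024 → (l.foldl (fun t bit => pvPass (1 <<< bit) t) t)[j]! = true →
      ∃ v, v < 1024 ∧ t0[v]! = true ∧ v ||| j = j := by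
  induction l generalizing t with
  | nil => exact hs
  | cons b l ih =>
    simp only [List.foldl_cons]
    apply ih (fun x hx => hl x (List.mem_cons_of_mem _ hx))
    intro j hj hget
    rw [pv_pass_get _ _ j hj, Nat.one_shiftLeft] at hget
    rcases Bool.or_eq_true_iff.mp hget with hget | hget
    · exact hs j hj hget
    · rcases Bool.and_eq_true_iff.mp hget with ⟨hbit, hget⟩
      have hbit' : j &&& 2 ^ b ≠ 0 := of_decide_eq_true hbit
      have hjx : j ^^^ 2 ^ b < 1024 := by
        have hb10 : b < 10 := hl b List.mem_cons_self
        have h2b : 2 ^ b < 2 ^ 10 := Nat.pow_lt_pow_right (by omega) hb10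
        have h1024 : (1024 : Nat) = 2 ^ 10 := by norm_num
        rw [h1024] at hj ⊢
        exact Nat.xor_lt_two_pow hj h2b
      obtain ⟨v, hv1, hv2, hv3⟩ := hs _ hjx hget
      exact ⟨v, hv1, hv2, pv_sub_trans hv3 (pv_xor_or j b hbit')⟩

lemma pv_sos_sound (t0 : Array Bool) (j : Nat) (hj : j < 1024) (h : (pvSos t0)[j]! = true) :
    ∃ v, v < 1024 ∧ t0[v]! = true ∧ v ||| j = j := by
  unfold pvSos at h
  exact pv_sosFold_sound t0 (List.range 10) (fun b hb => List.mem_range.mp hb) t0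
    (fun j hj hget => ⟨j, hj, hget, Nat.or_self j⟩) j hj h

-- Table index arithmetic used by the completeness argument.
lemma pv_u_eq (v k i : Nat) (h : v.testBit i = true ∨ k.testBit i = false) :
    v ||| k % 2 ^ (i + 1) = v ||| k % 2 ^ i := by
  apply Nat.eq_of_testBit_eq
  intro j
  simp only [Nat.testBit_or, Nat.testBit_mod_two_pow]
  by_cases hj : j = i
  · subst hj
    rcases h with h | h <;> simp [h]
  · by_cases hj2 : j < i
    · have : j < i + 1 := by omega
      simp [hj2, this]
    · have h2 : ¬ j < i + 1 := by omega
      simp [hj2, h2]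

lemma pv_u_xor (v k i : Nat) (hv : v.testBit i = false) (hk : k.testBit i = true) :
    (v ||| k % 2 ^ (i + 1)) ^^^ 2 ^ i = v ||| k % 2 ^ i := by
  apply Nat.eq_of_testBit_eq
  intro j
  simp only [Nat.testBit_xor, Nat.testBit_or, Nat.testBit_mod_two_pow, Nat.testBit_two_pow]
  by_cases hj : j = i
  · subst hj
    simp [hv, hk]
  · have hij : ¬ (i = j) := fun h => hj h.symm
    by_cases hj2 : j < i
    · have : j < i + 1 := by omega
      simp [hj2, this, hij]
    · have h2 : ¬ j < i + 1 := by omega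
      simp [hj2, h2, hij]

lemma pv_u_bit (v k i : Nat) (hk : k.testBit i = true) :
    (v ||| k % 2 ^ (i + 1)) &&& 2 ^ i ≠ 0 := by
  have hbit : (v ||| k % 2 ^ (i + 1)).testBit i = true := by
    simp [Nat.testBit_or, Nat.testBit_mod_two_pow, hk]
  rw [Nat.and_two_pow, hbit]
  simp

lemma pv_u_lt (v k i : Nat) (hsub : v ||| k = k) (hk : k < 1024) :
    v ||| k % 2 ^ i < 1024 := by
  have hsub' : (v ||| k % 2 ^ i) ||| k = k := by
    calc (v ||| k % 2 ^ i) ||| k = v ||| (k % 2 ^ i ||| k) := by rw [Nat.or_assoc]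
      _ = v ||| k := by rw [pv_mod_or]
      _ = k := hsub
  calc v ||| k % 2 ^ i ≤ (v ||| k % 2 ^ i) ||| k := Nat.left_le_or
    _ = k := hsub'
    _ < 1024 := hk

-- Completeness: a true seed entry propagates to each of its supermasks below 1024.
lemma pv_sos_complete (t : Array Bool) (v k : Nat) (hv : t[v]! = true)
    (hsub : v ||| k = k) (hk : k < 1024) : (pvSos t)[k]! = true := by
  have main : ∀ i : Nat,
      ((List.range i).foldl (fun t bit => pvPass (1 <<< bit) t) t)[v ||| k % 2 ^ i]! = true := by
    intro i
    induction i with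
    | zero => simpa [Nat.mod_one] using hv
    | succ i ih =>
      rw [List.range_succ, List.foldl_append, List.foldl_cons, List.foldl_nil,
        pv_pass_get _ _ _ (pv_u_lt v k (i + 1) hsub hk), Nat.one_shiftLeft]
      by_cases hki : k.testBit i = true
      · by_cases hvi : v.testBit i = true
        · rw [pv_u_eq v k i (Or.inl hvi), ih]
          simp
        · have hvi' : v.testBit i = false := by revert hvi; cases v.testBit i <;> simp
          rw [pv_u_xor v k i hvi' hki, ih,
            decide_eq_true (pv_u_bit v k i hki)]
          simp
      · have hki' : k.testBit i = false := by revert hki; cases k.testBit i <;> simp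
        rw [pv_u_eq v k i (Or.inr hki'), ih]
        simp
  have h10 := main 10
  rw [Nat.mod_eq_of_lt (show k < 2 ^ 10 by simpa using hk), hsub] at h10
  exact h10

-- Seed table characterisation.
lemma pv_seed_get (a : Int) (b_a : List Int) (w : Nat) (hw : w < 1024) :
    (pvSeed a b_a)[w]! = true ↔ ∃ b ∈ b_a, Int.land a b = (w : Int) := by
  unfold pvSeed
  rw [pv_ofFn_get _ w hw]
  rw [show (PySem.Set.contains (pvVs a b_a) ((w : Nat) : Int) = true)
      ↔ ((w : Int) ∈ pvVs a b_a) from by simp [PySem.Set.contains]]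
  unfold pvVs
  rw [PySem.Set.mem_ofList]
  constructor
  · intro h
    obtain ⟨b, hb, hb2⟩ := List.mem_map.mp h
    exact ⟨b, hb, hb2⟩
  · rintro ⟨b, hb, hb2⟩
    exact List.mem_map.mpr ⟨b, hb, hb2⟩

-- Bridge between Python-int `(v | k) == k` and the Nat submask relation.
lemma pv_int_lor_iff (w : Int) (k : Nat) :
    Int.lor w (k : Int) = (k : Int) ↔ 0 ≤ w ∧ w.toNat ||| k = k := by
  cases w with
  | ofNat m =>
    constructor
    · intro h
      refine ⟨Int.natCast_nonneg m, ?_⟩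
      have h' : Int.ofNat (m ||| k) = Int.ofNat k := h
      simpa using h'
    · rintro ⟨-, h⟩
      show Int.ofNat (m ||| k) = Int.ofNat k
      simpa using h
  | negSucc m =>
    constructor
    · intro h
      exfalso
      have h' : Int.negSucc (m.ldiff k) = Int.ofNat k := h
      simp at h'
    · rintro ⟨h, -⟩
      exact absurd h (by simp)

-- The per-a feasibility agrees with A's inner double loop.
lemma pv_ok_iff (a : Int) (b_a : List Int) (k : Nat) (hk : k < 1024) :
    (pvOk a b_a)[k]! = b_a.any (fun b => ((Int.land a b).lor (k : Int) == (k : Int))) := by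
  unfold pvOk
  by_cases h : (b_a.any fun b => ((Int.land a b).lor (k : Int) == (k : Int))) = true
  · rw [h]
    rw [List.any_eq_true] at h
    obtain ⟨b, hb, hpred⟩ := h
    rw [beq_iff_eq, pv_int_lor_iff] at hpred
    obtain ⟨h1, h2⟩ := hpred
    have hlt : (Int.land a b).toNat < 1024 := by
      calc (Int.land a b).toNat ≤ (Int.land a b).toNat ||| k := Nat.left_le_or
        _ = k := h2
        _ < 1024 := hk
    apply pv_sos_complete (pvSeed a b_a) (Int.land a b).toNat k _ h2 hk
    rw [pv_seed_get a b_a _ hlt]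
    exact ⟨b, hb, by rw [Int.toNat_of_nonneg h1]⟩
  · rw [Bool.not_eq_true] at h
    rw [h, Bool.eq_false_iff]
    intro h2
    obtain ⟨v, hv1, hv2, hv3⟩ := pv_sos_sound _ _ hk h2
    obtain ⟨b, hb, hb2⟩ := (pv_seed_get a b_a v hv1).mp hv2
    rw [List.any_eq_false] at h
    apply h b hb
    rw [beq_iff_eq, pv_int_lor_iff, hb2]
    exact ⟨Int.natCast_nonneg v, by simpa using hv3⟩

-- The cnt table counts, per index, the a's whose feasibility entry is set.
lemma pv_cnt_get (a_a b_a : List Int) (k : Nat) (hk : k < 1024) :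
    (pvCnt a_a b_a)[k]! = (a_a.countP (fun a => (pvOk a b_a)[k]!) : Int) := by
  unfold pvCnt
  have main : ∀ (l : List Int) (acc : Array Int),
      ((l.foldl (fun cnt a =>
        let ok := pvOk a b_a;
        Array.ofFn (fun j : Fin 1024 => if ok[j.val]! then cnt[j.val]! + 1 else cnt[j.val]!)) acc)[k]!)
        = acc[k]! + (l.countP (fun a => (pvOk a b_a)[k]!) : Int) := by
    intro l
    induction l with
    | nil => simp
    | cons a l ih =>
      intro acc
      simp only [List.foldl_cons]
      rw [ih, List.countP_cons, pv_ofFn_get _ k hk]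
      split_ifs with h <;> simp [h] <;> push_cast <;> ring
  rw [main a_a (Array.replicate 1024 0), pv_repl_get k hk]
  simp

-- A's counting fold is a countP.
lemma pv_foldl_count (q : Int → Bool) (l : List Int) (c : Int) :
    l.foldl (fun cnt a => if q a then cnt + 1 else cnt) c = c + (l.countP q : Int) := by
  induction l generalizing c with
  | nil => simp
  | cons a l ih =>
    by_cases h : q a <;> simp [h, ih, List.countP_cons] <;> push_cast <;> ring

lemma pv_cnt_agree (a_a b_a : List Int) (k : Nat) (hk : k < 1024) :
    pvA_cnt (k : Int) a_a b_a = (pvCnt a_a b_a)[k]! := by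
  unfold pvA_cnt
  rw [pv_foldl_count, pv_cnt_get a_a b_a k hk]
  have hc : a_a.countP (fun a => b_a.any fun b => ((Int.land a b).lor (k : Int) == (k : Int)))
      = a_a.countP (fun a => (pvOk a b_a)[k]!) :=
    List.countP_congr (fun a _ => by rw [pv_ok_iff a b_a k hk])
  rw [hc]
  ring

-- The two final scans agree over the candidate list.
lemma pv_scan_eq (n : Int) (a_a b_a : List Int) (ks : List Int)
    (h : ∀ k ∈ ks, 0 ≤ k ∧ k < 1024) :
    pvA_loop n a_a b_a ks = pvB_scan n (pvCnt a_a b_a) ks := by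
  induction ks with
  | nil => rfl
  | cons k ks ih =>
    have h0 := h k List.mem_cons_self
    have hkrep : ((k.toNat : Nat) : Int) = k := Int.toNat_of_nonneg h0.1
    have hklt : k.toNat < 1024 := by omega
    have hcnt : pvA_cnt k a_a b_a = (pvCnt a_a b_a)[k.toNat]! := by
      rw [← hkrep]
      exact pv_cnt_agree a_a b_a k.toNat hklt
    show (if pvA_cnt k a_a b_a == n then k else pvA_loop n a_a b_a ks)
        = (if (pvCnt a_a b_a)[k.toNat]! == n then k else pvB_scan n (pvCnt a_a b_a) ks)
    rw [hcnt, ih (fun x hx => h x (List.mem_cons_of_mem _ hx))]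

-- ===== VERDICT (by name: the statement is the Claim_ definition above) =====
set_option maxRecDepth 10000 in
theorem boboniu_and_bit_operations_spec : Claim_equal_boboniu_and_bit_operations := by
  intro n m a_a b_a _
  unfold Spec_boboniu_and_bit_operations boboniu_and_bit_operations boboniu_and_bit_operations_alt
  apply pv_scan_eq
  intro k hk
  rw [PySem.List.mem_pyRange_one] at hk
  exact ⟨hk.1, by linarith [hk.2]⟩
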